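-- pv_equiv track=rewrite | github.com/PrinceSinghhub/GFG-Questions | Change Bits.py | changeBits
-- ===== SOURCE A (Python) =====
-- def changeBits(N):
--    z=bin(N)[2:]
--    s=""
--    for i in range(len(z)):
--        s+="1"
--    m=int(s,2)
--    l=[]
--    l.append(m-N)
--    l.append(m)
--    return l
-- ===== SOURCE B (Python) =====
-- def changeBits(N):
--     # Saturate to the all-ones mask by recursing over the digits of bin(N)[2:],
--     # folding each one numerically (m -> 2*m+1) instead of building and re-parsing a string.
--     def ones(digits, m):
--         if not digits:
--             return m
--         return ones(digits[1:], 2 * m + 1)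
--     m = ones(bin(N)[2:], 0)
--     return [m - N, m]
-- ===== Notes on version B (the rewrite author's own statement) =====
-- stated objective: alternative
-- what changed: Replaces the staged build-a-string-of-ones-then-int(s,2) computation with a tail recursion over the digits of bin(N)[2:] that folds the mask numerically (m -> 2*m+1), never materialising an intermediate string or parsing one.
import Mathlib
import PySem

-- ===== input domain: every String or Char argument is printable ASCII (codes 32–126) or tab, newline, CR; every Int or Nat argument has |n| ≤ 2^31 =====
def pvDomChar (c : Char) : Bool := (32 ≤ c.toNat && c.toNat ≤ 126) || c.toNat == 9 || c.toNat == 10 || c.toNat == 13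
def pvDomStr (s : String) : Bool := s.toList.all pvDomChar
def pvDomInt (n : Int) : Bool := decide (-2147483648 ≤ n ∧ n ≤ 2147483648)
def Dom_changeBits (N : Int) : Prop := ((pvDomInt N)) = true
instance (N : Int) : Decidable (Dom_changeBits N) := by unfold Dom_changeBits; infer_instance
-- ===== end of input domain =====

-- B folds the all-ones mask numerically by a tail recursion over the digits of bin(N)[2:]
-- instead of building a string of ones and re-parsing it in base two (objective: alternative).

-- ===== PORT A =====
-- int(s, 2) ported by hand as a binary-digit fold: exact for nonempty strings of
-- the digits '0'/'1' with no sign/prefix/whitespace/underscore — which s below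
-- always is (s = "1" * len(bin(N)[2:]), and bin(N)[2:] is never empty).
def pvParseBin (cs : List Char) : Int :=
  cs.foldl (fun a c => a * 2 + (if c = '1' then 1 else 0)) 0

-- bin(N) ported via PySem.Int.toBinChars0b (= bin(N) as a list of chars, toList_pyBin)
def changeBits (N : Int) : List Int :=
  let z : List Char := PySem.List.slice (PySem.Int.toBinChars0b N) (some 2) none
  let s : List Char :=
    (PySem.List.pyRange 0 (PySem.List.len z) 1).foldl (fun s _ => s ++ ['1']) []
  let m : Int := pvParseBin s
  let l : List Int := []
  let l := l ++ [m - N]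
  let l := l ++ [m]
  l

-- ===== PORT B =====
-- tail recursion 'ones(digits, m)' from Source B, digit list consumed head first
def pvOnes : List Char → Int → Int
  | [], m => m
  | _ :: ds, m => pvOnes ds (2 * m + 1)

def changeBits_alt (N : Int) : List Int :=
  let m : Int := pvOnes (PySem.List.slice (PySem.Int.toBinChars0b N) (some 2) none) 0
  [m - N, m]

-- ===== PRECONDITION & SPEC =====
def Spec_changeBits (N : Int) (out : List Int) : Prop := out = changeBits_alt N
instance (N : Int) (out : List Int) : Decidable (Spec_changeBits N out) := by unfold Spec_changeBits; infer_instance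

-- ===== CLAIM (what is proved, stated in full; the proofs are below) =====
def Claim_equal_changeBits : Prop := ∀ (N : Int), Dom_changeBits N → Spec_changeBits N (changeBits N)

-- ===== LEMMAS AND PROOFS =====

-- the loop 'for i in range(n): s += "1"' appends n ones
theorem pvFold_ones (lst : List Int) (s : List Char) :
    lst.foldl (fun s _ => s ++ ['1']) s = s ++ List.replicate lst.length '1' := by
  induction lst generalizing s with
  | nil => simp
  | cons x xs ih => simp [List.foldl, ih, List.replicate_succ]

-- parsing a run of n ones in base 2
theorem pvParseBin_replicate (n : Nat) (a : Int) :
    List.foldl (fun a c => a * 2 + (if c = '1' then 1 else 0)) a (List.replicate n '1')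
      = a * 2 ^ n + (2 ^ n - 1) := by
  induction n generalizing a with
  | zero => simp
  | succ k ih =>
    rw [List.replicate_succ, List.foldl_cons, ih]
    simp only [reduceIte]
    ring

-- B's tail recursion computes the same closed form over its digit list
theorem pvOnes_eq (cs : List Char) (a : Int) :
    pvOnes cs a = a * 2 ^ cs.length + (2 ^ cs.length - 1) := by
  induction cs generalizing a with
  | nil => simp [pvOnes]
  | cons c ds ih =>
    rw [pvOnes, ih]
    simp only [List.length_cons]
    ring

-- ===== VERDICT (by name: the statement is the Claim_ definition above) =====
theorem changeBits_spec : Claim_equal_changeBits := by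
  intro N _
  unfold Spec_changeBits changeBits changeBits_alt pvParseBin
  simp only [pvFold_ones, List.nil_append, PySem.List.length_pyRange_one,
    PySem.List.len_eq, pvParseBin_replicate, pvOnes_eq]
  simp
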